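-- pv_equiv track=rewrite | github.com/TortReborn/Tort-Reborn | Commands/app_commands.py | _fuzzy_match_recruiter
-- ===== SOURCE A (Python) =====
-- def _fuzzy_match_recruiter(recruiter_input: str, member_names: list[str]) -> str | None:
--     lower_input = recruiter_input.lower()
--
--     for name in member_names:
--         if name.lower() == lower_input:
--             return name
--
--     matches = [name for name in member_names if lower_input in name.lower()]
--     if len(matches) == 1:
--         return matches[0]
--
--     return None
-- ===== SOURCE B (Python) =====
-- def _fuzzy_match_recruiter(recruiter_input: str, member_names: list[str]) -> str | None:
--     lower_input = recruiter_input.lower()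
--     exact = None
--     count = 0
--     first = None
--     for name in reversed(member_names):
--         low = name.lower()
--         if low == lower_input:
--             exact = name
--         if lower_input in low:
--             count += 1
--             first = name
--     if exact is not None:
--         return exact
--     return first if count == 1 else None
-- ===== Notes on version B (the rewrite author's own statement) =====
-- stated objective: alternative
-- what changed: Instead of A's early-returning forward scan plus a separate substring-filter list comprehension, B traverses the list once in REVERSE with O(1) state (exact, count, first) using overwrite semantics so the last write corresponds to the first element in original order, never building a match list.
import Mathlib
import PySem

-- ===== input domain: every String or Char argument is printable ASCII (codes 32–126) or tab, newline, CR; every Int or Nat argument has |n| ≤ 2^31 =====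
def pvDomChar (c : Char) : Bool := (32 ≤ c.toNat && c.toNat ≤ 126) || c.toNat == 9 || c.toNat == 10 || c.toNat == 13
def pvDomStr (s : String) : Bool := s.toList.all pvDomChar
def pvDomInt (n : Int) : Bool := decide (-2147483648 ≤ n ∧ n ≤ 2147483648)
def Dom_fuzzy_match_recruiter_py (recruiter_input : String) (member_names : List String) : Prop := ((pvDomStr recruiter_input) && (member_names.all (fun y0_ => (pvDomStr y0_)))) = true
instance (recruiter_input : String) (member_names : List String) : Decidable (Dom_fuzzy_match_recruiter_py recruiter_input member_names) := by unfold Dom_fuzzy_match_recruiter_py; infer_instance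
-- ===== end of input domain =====

-- B replaces A's early-returning forward scan plus substring-filter comprehension with a
-- single REVERSE traversal threading O(1) state (exact, count, first), overwrite semantics
-- making the last write the first element in original order (objective: alternative, same cost).

-- ===== PORT A =====
-- the early-returning 'for name in member_names: if name.lower() == lower_input: return name'
def pvA_exactLoop (li : String) : List String → Option String
  | [] => none
  | n :: rest => if PySem.Str.lower n = li then some n else pvA_exactLoop li rest

def fuzzy_match_recruiter_py (recruiter_input : String) (member_names : List String) : Option String :=
  let lower_input := PySem.Str.lower recruiter_input
  match pvA_exactLoop lower_input member_names with
  | some n => some n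
  | none =>
    let ms := member_names.filter (fun n => PySem.Str.isIn lower_input (PySem.Str.lower n))
    if ms.length = 1 then ms.head? else none

-- ===== PORT B =====
-- one loop over reversed(member_names) threading (exact, count, first)
def pvB_step (li : String) (st : Option String × Nat × Option String) (n : String) :
    Option String × Nat × Option String :=
  let low := PySem.Str.lower n
  let ex := if low = li then some n else st.1
  if PySem.Str.isIn li low then (ex, st.2.1 + 1, some n) else (ex, st.2.1, st.2.2)

def fuzzy_match_recruiter_py_alt (recruiter_input : String) (member_names : List String) : Option String :=
  let li := PySem.Str.lower recruiter_input
  let st := member_names.reverse.foldl (pvB_step li) (none, 0, none)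
  match st.1 with
  | some e => some e
  | none => if st.2.1 = 1 then st.2.2 else none

-- ===== PRECONDITION & SPEC =====
def Spec_fuzzy_match_recruiter_py (recruiter_input : String) (member_names : List String) (out : Option String) : Prop := out = fuzzy_match_recruiter_py_alt recruiter_input member_names
instance (recruiter_input : String) (member_names : List String) (out : Option String) : Decidable (Spec_fuzzy_match_recruiter_py recruiter_input member_names out) := by unfold Spec_fuzzy_match_recruiter_py; infer_instance

-- ===== CLAIM (what is proved, stated in full; the proofs are below) =====
def Claim_equal_fuzzy_match_recruiter_py : Prop := ∀ (recruiter_input : String) (member_names : List String), Dom_fuzzy_match_recruiter_py recruiter_input member_names → Spec_fuzzy_match_recruiter_py recruiter_input member_names (fuzzy_match_recruiter_py recruiter_input member_names)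

-- ===== LEMMAS AND PROOFS =====
-- the reverse fold, viewed as a foldr, computes A's exact-loop result, the number of
-- substring matches, and the first substring match in original order
theorem pvB_foldr_char (li : String) (mn : List String) :
    mn.foldr (fun n st => pvB_step li st n) (none, 0, none)
      = (pvA_exactLoop li mn,
         (mn.filter (fun n => PySem.Str.isIn li (PySem.Str.lower n))).length,
         (mn.filter (fun n => PySem.Str.isIn li (PySem.Str.lower n))).head?) := by
  induction mn with
  | nil => rfl
  | cons n rest ih =>
    rw [List.foldr_cons, ih]
    simp only [pvB_step, pvA_exactLoop, List.filter_cons]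
    by_cases h : PySem.Str.isIn li (PySem.Str.lower n) = true
    · simp only [if_pos h, List.length_cons, List.head?_cons]
    · simp only [if_neg h]

-- ===== VERDICT (by name: the statement is the Claim_ definition above) =====
theorem fuzzy_match_recruiter_py_spec : Claim_equal_fuzzy_match_recruiter_py := by
  intro ri mn _
  unfold Spec_fuzzy_match_recruiter_py
  dsimp only [fuzzy_match_recruiter_py, fuzzy_match_recruiter_py_alt]
  rw [List.foldl_reverse, pvB_foldr_char]
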